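-- pv_equiv track=rewrite | github.com/markuswondrak/AgentMux | agentmux/integrations/mcp.py | _strip_codex_server_block
-- ===== SOURCE A (Python) =====
-- def _strip_codex_server_block(content: str, server_name: str) -> str:
--     headers = {
--         f"[mcp_servers.{server_name}]",
--         f"[mcp_servers.{server_name}.env]",
--     }
--     lines = content.splitlines(keepends=True)
--     kept: list[str] = []
--     index = 0
--     while index < len(lines):
--         stripped = lines[index].strip()
--         if stripped in headers:
--             index += 1
--             while index < len(lines) and not lines[index].lstrip().startswith("["):
--                 index += 1
--             continue
--         kept.append(lines[index])
--         index += 1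
--     return "".join(kept).rstrip()
-- ===== SOURCE B (Python) =====
-- def _strip_codex_server_block(content: str, server_name: str) -> str:
--     headers = {
--         f"[mcp_servers.{server_name}]",
--         f"[mcp_servers.{server_name}.env]",
--     }
--     kept: list[str] = []
--     skipping = False
--     for line in content.splitlines(keepends=True):
--         if line.lstrip().startswith("["):
--             skipping = line.strip() in headers
--         if not skipping:
--             kept.append(line)
--     return "".join(kept).rstrip()
-- ===== Notes on version B (the rewrite author's own statement) =====
-- stated objective: simpler
-- what changed: Replaces A's explicit index with a nested inner skip-while loop by a single flag-driven state machine pass: a boolean 'skipping' is updated at each section header line and lines are kept only while it is False.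
import Mathlib
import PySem

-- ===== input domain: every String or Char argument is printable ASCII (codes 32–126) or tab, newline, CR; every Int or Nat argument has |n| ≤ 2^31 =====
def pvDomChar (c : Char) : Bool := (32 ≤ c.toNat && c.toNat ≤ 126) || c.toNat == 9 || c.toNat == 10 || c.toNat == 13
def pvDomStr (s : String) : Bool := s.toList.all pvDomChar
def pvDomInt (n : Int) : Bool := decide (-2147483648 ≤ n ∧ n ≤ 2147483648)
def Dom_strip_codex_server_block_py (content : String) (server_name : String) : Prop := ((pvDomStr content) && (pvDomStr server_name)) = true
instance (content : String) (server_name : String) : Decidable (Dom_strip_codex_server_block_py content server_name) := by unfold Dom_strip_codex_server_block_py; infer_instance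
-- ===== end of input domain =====

-- B replaces A's index-jumping nested skip loop by one flag-driven state-machine pass (objective: simpler).


-- shared helpers (both Pythons call content.splitlines(keepends=True) and build the same 2-element header set)

-- Python splitlines(keepends=True), hand-ported (PySem.Chars.splitlines drops the ends);
-- exact on Dom, where the only line-break characters are '\n', '\r' and the pair '\r\n'.
def pvSLK (cur : List Char) : List Char → List (List Char)
  | [] => if cur = [] then [] else [cur.reverse]
  | '\r' :: '\n' :: rest => (cur.reverse ++ ['\r', '\n']) :: pvSLK [] rest
  | '\r' :: rest => (cur.reverse ++ ['\r']) :: pvSLK [] rest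
  | '\n' :: rest => (cur.reverse ++ ['\n']) :: pvSLK [] rest
  | c :: rest => pvSLK (c :: cur) rest

-- headers = {f"[mcp_servers.{server_name}]", f"[mcp_servers.{server_name}.env]"}
def pvHeaders (server_name : String) : PySem.Set (List Char) :=
  PySem.Set.ofList
    [ "[mcp_servers.".toList ++ server_name.toList ++ "]".toList,
      "[mcp_servers.".toList ++ server_name.toList ++ ".env]".toList ]

-- ===== PORT A =====
-- inner 'while index < len(lines) and not lines[index].lstrip().startswith("[")'
def pvSkipA : List (List Char) → List (List Char)
  | [] => []
  | l :: rest =>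
    if PySem.Chars.startswith (PySem.Chars.lstrip l) ['['] then l :: rest else pvSkipA rest

theorem pvSkipA_length_le (ls : List (List Char)) : (pvSkipA ls).length ≤ ls.length := by
  induction ls with
  | nil => simp [pvSkipA]
  | cons l rest ih =>
    simp only [pvSkipA]
    split
    · simp
    · exact Nat.le_succ_of_le ih

-- outer while loop of A, index recursion over the remaining lines
def pvGoA (headers : PySem.Set (List Char)) : List (List Char) → List (List Char)
  | [] => []
  | l :: rest =>
    if PySem.Set.contains headers (PySem.Chars.strip l) then
      pvGoA headers (pvSkipA rest)
    else
      l :: pvGoA headers rest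
  termination_by ls => ls.length
  decreasing_by
  · exact Nat.lt_succ_of_le (pvSkipA_length_le rest)
  · simp

def strip_codex_server_block_py (content : String) (server_name : String) : String :=
  String.ofList (PySem.Chars.rstrip
    (PySem.Chars.join [] (pvGoA (pvHeaders server_name) (pvSLK [] content.toList))))

-- ===== PORT B =====
-- B's single for-loop with the boolean 'skipping' flag
def pvGoB (headers : PySem.Set (List Char)) : Bool → List (List Char) → List (List Char)
  | _, [] => []
  | skipping, l :: rest =>
    let skipping' :=
      if PySem.Chars.startswith (PySem.Chars.lstrip l) ['['] then
        PySem.Set.contains headers (PySem.Chars.strip l)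
      else skipping
    (if skipping' then [] else [l]) ++ pvGoB headers skipping' rest

def strip_codex_server_block_py_alt (content : String) (server_name : String) : String :=
  String.ofList (PySem.Chars.rstrip
    (PySem.Chars.join [] (pvGoB (pvHeaders server_name) false (pvSLK [] content.toList))))

-- ===== PRECONDITION & SPEC =====
def Spec_strip_codex_server_block_py (content : String) (server_name : String) (out : String) : Prop := out = strip_codex_server_block_py_alt content server_name
instance (content : String) (server_name : String) (out : String) : Decidable (Spec_strip_codex_server_block_py content server_name out) := by unfold Spec_strip_codex_server_block_py; infer_instance

-- ===== CLAIM (what is proved, stated in full; the proofs are below) =====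
def Claim_equal_strip_codex_server_block_py : Prop := ∀ (content : String) (server_name : String), Dom_strip_codex_server_block_py content server_name → Spec_strip_codex_server_block_py content server_name (strip_codex_server_block_py content server_name)

-- ===== LEMMAS AND PROOFS =====

-- every header starts with '['
theorem pvHeaders_head (server_name : String) (h : List Char) (hm : h ∈ pvHeaders server_name) :
    ∃ t, h = '[' :: t := by
  have := (PySem.Set.mem_ofList (y := h)
    (xs := [ "[mcp_servers.".toList ++ server_name.toList ++ "]".toList,
             "[mcp_servers.".toList ++ server_name.toList ++ ".env]".toList ])).mp hm
  have hpre : "[mcp_servers.".toList = '[' :: "mcp_servers.".toList := by decide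
  simp only [List.mem_cons, List.not_mem_nil, or_false] at this
  rcases this with h1 | h2
  · exact ⟨"mcp_servers.".toList ++ server_name.toList ++ "]".toList,
      by rw [h1, hpre]; simp⟩
  · exact ⟨"mcp_servers.".toList ++ server_name.toList ++ ".env]".toList,
      by rw [h2, hpre]; simp⟩

-- a line whose strip() is a header has a lstrip() starting with '['
theorem pvKey (headers : PySem.Set (List Char)) (hH : ∀ h ∈ headers, ∃ t, h = '[' :: t)
    (l : List Char) (hc : PySem.Set.contains headers (PySem.Chars.strip l) = true) :
    PySem.Chars.startswith (PySem.Chars.lstrip l) ['['] = true := by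
  have hmem : PySem.Chars.strip l ∈ headers := (PySem.Set.contains_iff _ _).mp hc
  obtain ⟨t, ht⟩ := hH _ hmem
  -- strip l = rstrip (lstrip l) is a prefix of lstrip l
  have hpref : PySem.Chars.strip l <+: PySem.Chars.lstrip l := by
    have hsuf : List.dropWhile PySem.Chars.isspace (PySem.Chars.lstrip l).reverse
        <:+ (PySem.Chars.lstrip l).reverse := List.dropWhile_suffix _
    have := List.reverse_prefix.mpr hsuf
    simpa [PySem.Chars.strip, PySem.Chars.rstrip] using this
  obtain ⟨u, hu⟩ := hpref
  rw [ht] at hu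
  have : ['['] <+: PySem.Chars.lstrip l := ⟨t ++ u, by rw [← hu]; simp⟩
  simpa [PySem.Chars.startswith] using List.isPrefixOf_iff_prefix.mpr this

theorem pvGo_eq (headers : PySem.Set (List Char)) (hH : ∀ h ∈ headers, ∃ t, h = '[' :: t) :
    ∀ (n : Nat) (ls : List (List Char)), ls.length ≤ n →
      pvGoB headers false ls = pvGoA headers ls ∧
      pvGoB headers true ls = pvGoA headers (pvSkipA ls) := by
  intro n
  induction n with
  | zero =>
    intro ls hls
    have : ls = [] := List.eq_nil_of_length_eq_zero (Nat.le_zero.mp hls)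
    subst this
    exact ⟨by simp [pvGoA, pvGoB], by simp [pvGoA, pvGoB, pvSkipA]⟩
  | succ n ih =>
    intro ls hls
    cases ls with
    | nil => exact ⟨by simp [pvGoA, pvGoB], by simp [pvGoA, pvGoB, pvSkipA]⟩
    | cons l rest =>
      have hrest : rest.length ≤ n := by simpa using hls
      have hskip : (pvSkipA rest).length ≤ n :=
        le_trans (pvSkipA_length_le rest) hrest
      by_cases hb : PySem.Chars.startswith (PySem.Chars.lstrip l) ['['] = true
      · by_cases hm : PySem.Set.contains headers (PySem.Chars.strip l) = true
        · have hfalse : pvGoB headers false (l :: rest) = pvGoA headers (l :: rest) := by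
            simp only [pvGoB, pvGoA, hb, hm, if_true]
            simpa using (ih rest hrest).2
          refine ⟨hfalse, ?_⟩
          have hsk : pvSkipA (l :: rest) = l :: rest := by simp [pvSkipA, hb]
          have : pvGoB headers true (l :: rest) = pvGoB headers false (l :: rest) := by
            simp only [pvGoB, hb, if_true]
          rw [this, hfalse, hsk]
        · have hfalse : pvGoB headers false (l :: rest) = pvGoA headers (l :: rest) := by
            simp only [pvGoB, pvGoA, hb, hm, if_true]
            simpa using (ih rest hrest).1
          refine ⟨hfalse, ?_⟩
          have hsk : pvSkipA (l :: rest) = l :: rest := by simp [pvSkipA, hb]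
          have : pvGoB headers true (l :: rest) = pvGoB headers false (l :: rest) := by
            simp only [pvGoB, hb, if_true]
          rw [this, hfalse, hsk]
      · have hm : PySem.Set.contains headers (PySem.Chars.strip l) = false := by
          by_contra hcon
          exact hb (pvKey headers hH l (by simpa using hcon))
        constructor
        · simp only [pvGoB, pvGoA, hb, hm, if_false, Bool.false_eq_true]
          simpa using (ih rest hrest).1
        · have hsk : pvSkipA (l :: rest) = pvSkipA rest := by simp [pvSkipA, hb]
          rw [hsk]
          simp only [pvGoB, hb]
          simpa using (ih rest hrest).2

-- ===== VERDICT (by name: the statement is the Claim_ definition above) =====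
theorem strip_codex_server_block_py_spec : Claim_equal_strip_codex_server_block_py := by
  intro content server_name _
  unfold Spec_strip_codex_server_block_py
  unfold strip_codex_server_block_py strip_codex_server_block_py_alt
  have := (pvGo_eq (pvHeaders server_name) (pvHeaders_head server_name)
    (pvSLK [] content.toList).length (pvSLK [] content.toList) le_rfl).1
  rw [this]
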